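-- pv_equiv track=rewrite | github.com/bishalrnmagar/n8n-oracle-app | parser/message_parser.py | match_category
-- ===== SOURCE A (Python) =====
-- CATEGORY_KEYWORDS = {
--     "Food": ["food", "lunch", "dinner", "breakfast", "snack", "meal", "restaurant", "cafe", "chai", "tea", "coffee", "momo", "dal bhat", "tiffin", "canteen"],
--     "Transport": ["petrol", "diesel", "fuel", "uber", "taxi", "bus", "bike", "ride", "fare", "auto", "grab", "ola", "pathao"],
--     "Groceries": ["groceries", "grocery", "vegetables", "fruits", "supermarket", "bhatbhateni", "bigmart", "dairy", "milk", "eggs"],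
--     "Rent": ["rent", "house rent", "room rent", "flat"],
--     "Utilities": ["electricity", "water", "internet", "wifi", "phone", "mobile", "recharge", "bill", "nea", "ntc", "ncell"],
--     "Entertainment": ["movie", "netflix", "spotify", "game", "party", "outing", "drinks", "beer"],
--     "Health": ["medicine", "doctor", "hospital", "pharmacy", "gym", "medical", "health", "dental"],
--     "Shopping": ["clothes", "shoes", "electronics", "amazon", "daraz", "gadget", "laptop"],
--     "Subscriptions": ["subscription", "premium", "membership", "annual", "monthly plan"],
--     "Education": ["books", "course", "tuition", "class", "training", "udemy", "coursera"],
-- }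
--
-- def match_category(text):
--     """Find the best matching category by longest keyword match."""
--     matched = "Misc"
--     matched_kw = ""
--     lower = text.lower()
--
--     for cat, keywords in CATEGORY_KEYWORDS.items():
--         for kw in keywords:
--             if kw in lower and len(kw) > len(matched_kw):
--                 matched = cat
--                 matched_kw = kw
--
--     return matched, matched_kw
-- ===== SOURCE B (Python) =====
-- # Longest-match lookup table, flattened to "keyword:Category" entries and
-- # written in DESCENDING keyword-length order (equal lengths keep the original
-- # dict's insertion order), so the first substring hit is exactly the longest
-- # match with the earliest-tie rule. No per-call scan of the whole dict.
-- _TABLE = (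
--     "subscription:Subscriptions",
--     "monthly plan:Subscriptions",
--     "supermarket:Groceries",
--     "bhatbhateni:Groceries",
--     "electricity:Utilities",
--     "electronics:Shopping",
--     "restaurant:Food",
--     "vegetables:Groceries",
--     "house rent:Rent",
--     "membership:Subscriptions",
--     "breakfast:Food",
--     "groceries:Groceries",
--     "room rent:Rent",
--     "dal bhat:Food",
--     "internet:Utilities",
--     "recharge:Utilities",
--     "medicine:Health",
--     "hospital:Health",
--     "pharmacy:Health",
--     "training:Education",
--     "coursera:Education",
--     "canteen:Food",
--     "grocery:Groceries",
--     "bigmart:Groceries",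
--     "netflix:Entertainment",
--     "spotify:Entertainment",
--     "medical:Health",
--     "clothes:Shopping",
--     "premium:Subscriptions",
--     "tuition:Education",
--     "dinner:Food",
--     "coffee:Food",
--     "tiffin:Food",
--     "petrol:Transport",
--     "diesel:Transport",
--     "pathao:Transport",
--     "fruits:Groceries",
--     "mobile:Utilities",
--     "outing:Entertainment",
--     "drinks:Entertainment",
--     "doctor:Health",
--     "health:Health",
--     "dental:Health",
--     "amazon:Shopping",
--     "gadget:Shopping",
--     "laptop:Shopping",
--     "annual:Subscriptions",
--     "course:Education",
--     "lunch:Food",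
--     "snack:Food",
--     "dairy:Groceries",
--     "water:Utilities",
--     "phone:Utilities",
--     "ncell:Utilities",
--     "movie:Entertainment",
--     "party:Entertainment",
--     "shoes:Shopping",
--     "daraz:Shopping",
--     "books:Education",
--     "class:Education",
--     "udemy:Education",
--     "food:Food",
--     "meal:Food",
--     "cafe:Food",
--     "chai:Food",
--     "momo:Food",
--     "fuel:Transport",
--     "uber:Transport",
--     "taxi:Transport",
--     "bike:Transport",
--     "ride:Transport",
--     "fare:Transport",
--     "auto:Transport",
--     "grab:Transport",
--     "milk:Groceries",
--     "eggs:Groceries",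
--     "rent:Rent",
--     "flat:Rent",
--     "wifi:Utilities",
--     "bill:Utilities",
--     "game:Entertainment",
--     "beer:Entertainment",
--     "tea:Food",
--     "bus:Transport",
--     "ola:Transport",
--     "nea:Utilities",
--     "ntc:Utilities",
--     "gym:Health",
-- )
--
-- _PAIRS = [entry.split(":") for entry in _TABLE]
--
-- def match_category(text):
--     """Find the best matching category by longest keyword match."""
--     lower = text.lower()
--     for kw, cat in _PAIRS:
--         if kw in lower:
--             return cat, kw
--     return "Misc", ""
-- ===== Notes on version B (the rewrite author's own statement) =====
-- stated objective: alternative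
-- what changed: A scans every keyword of the dict keeping the longest match so far; B stores the keywords as a flat keyword:Category table pre-ordered by descending keyword length (ties in original insertion order), parsed once at import, and returns on the first substring hit, which by the ordering is exactly A's longest-match-earliest-tie winner.
import Mathlib
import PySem

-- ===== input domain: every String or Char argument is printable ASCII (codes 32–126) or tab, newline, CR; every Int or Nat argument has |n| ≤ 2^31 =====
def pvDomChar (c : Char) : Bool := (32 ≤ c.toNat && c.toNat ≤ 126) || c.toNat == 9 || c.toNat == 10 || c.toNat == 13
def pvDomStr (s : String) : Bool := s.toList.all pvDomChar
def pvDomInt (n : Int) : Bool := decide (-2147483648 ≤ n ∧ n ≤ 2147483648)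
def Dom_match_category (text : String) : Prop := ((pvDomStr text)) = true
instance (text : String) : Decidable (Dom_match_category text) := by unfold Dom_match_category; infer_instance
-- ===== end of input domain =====

-- B replaces A's full scan (keep the longest match so far over a dict of lists) by a flat
-- "keyword:Category" table written in descending keyword-length order, parsed once, with an
-- early-returning first-hit scan.

-- ===== PORT A =====
-- the module constant CATEGORY_KEYWORDS (a dict literal, in insertion order)
def categoryKeywords : List (String × List String) :=
  [ ("Food", ["food", "lunch", "dinner", "breakfast", "snack", "meal", "restaurant", "cafe", "chai", "tea", "coffee", "momo", "dal bhat", "tiffin", "canteen"]),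
    ("Transport", ["petrol", "diesel", "fuel", "uber", "taxi", "bus", "bike", "ride", "fare", "auto", "grab", "ola", "pathao"]),
    ("Groceries", ["groceries", "grocery", "vegetables", "fruits", "supermarket", "bhatbhateni", "bigmart", "dairy", "milk", "eggs"]),
    ("Rent", ["rent", "house rent", "room rent", "flat"]),
    ("Utilities", ["electricity", "water", "internet", "wifi", "phone", "mobile", "recharge", "bill", "nea", "ntc", "ncell"]),
    ("Entertainment", ["movie", "netflix", "spotify", "game", "party", "outing", "drinks", "beer"]),
    ("Health", ["medicine", "doctor", "hospital", "pharmacy", "gym", "medical", "health", "dental"]),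
    ("Shopping", ["clothes", "shoes", "electronics", "amazon", "daraz", "gadget", "laptop"]),
    ("Subscriptions", ["subscription", "premium", "membership", "annual", "monthly plan"]),
    ("Education", ["books", "course", "tuition", "class", "training", "udemy", "coursera"]) ]

def match_category (text : String) : String × String :=
  let lower := PySem.Str.lower text
  categoryKeywords.foldl
    (fun acc ck =>
      ck.2.foldl
        (fun (acc : String × String) kw =>
          if PySem.Str.isIn kw lower = true ∧ PySem.Str.len acc.2 < PySem.Str.len kw
          then (ck.1, kw) else acc)
        acc)
    ("Misc", "")

-- ===== PORT B =====
-- Source B's module constant _TABLE: "keyword:Category" entries in descending keyword-length order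
def tableB : List String :=
  [ "subscription:Subscriptions",
    "monthly plan:Subscriptions",
    "supermarket:Groceries",
    "bhatbhateni:Groceries",
    "electricity:Utilities",
    "electronics:Shopping",
    "restaurant:Food",
    "vegetables:Groceries",
    "house rent:Rent",
    "membership:Subscriptions",
    "breakfast:Food",
    "groceries:Groceries",
    "room rent:Rent",
    "dal bhat:Food",
    "internet:Utilities",
    "recharge:Utilities",
    "medicine:Health",
    "hospital:Health",
    "pharmacy:Health",
    "training:Education",
    "coursera:Education",
    "canteen:Food",
    "grocery:Groceries",
    "bigmart:Groceries",
    "netflix:Entertainment",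
    "spotify:Entertainment",
    "medical:Health",
    "clothes:Shopping",
    "premium:Subscriptions",
    "tuition:Education",
    "dinner:Food",
    "coffee:Food",
    "tiffin:Food",
    "petrol:Transport",
    "diesel:Transport",
    "pathao:Transport",
    "fruits:Groceries",
    "mobile:Utilities",
    "outing:Entertainment",
    "drinks:Entertainment",
    "doctor:Health",
    "health:Health",
    "dental:Health",
    "amazon:Shopping",
    "gadget:Shopping",
    "laptop:Shopping",
    "annual:Subscriptions",
    "course:Education",
    "lunch:Food",
    "snack:Food",
    "dairy:Groceries",
    "water:Utilities",
    "phone:Utilities",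
    "ncell:Utilities",
    "movie:Entertainment",
    "party:Entertainment",
    "shoes:Shopping",
    "daraz:Shopping",
    "books:Education",
    "class:Education",
    "udemy:Education",
    "food:Food",
    "meal:Food",
    "cafe:Food",
    "chai:Food",
    "momo:Food",
    "fuel:Transport",
    "uber:Transport",
    "taxi:Transport",
    "bike:Transport",
    "ride:Transport",
    "fare:Transport",
    "auto:Transport",
    "grab:Transport",
    "milk:Groceries",
    "eggs:Groceries",
    "rent:Rent",
    "flat:Rent",
    "wifi:Utilities",
    "bill:Utilities",
    "game:Entertainment",
    "beer:Entertainment",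
    "tea:Food",
    "bus:Transport",
    "ola:Transport",
    "nea:Utilities",
    "ntc:Utilities",
    "gym:Health" ]

-- Source B's _PAIRS = [entry.split(":") for entry in _TABLE]; the separator is the nonempty
-- literal ":", so split? is always 'some', and every entry of the constant table splits
-- into exactly [kw, cat] (the fallbacks are dead).
def pairsB : List (String × String) :=
  tableB.map fun e =>
    match PySem.Str.split? e ":" with
    | some [kw, cat] => (kw, cat)
    | _ => ("", "")

-- Source B's for-loop with its early return: first pair whose keyword occurs in lower
def firstHit (lower : String) : List (String × String) → String × String
  | [] => ("Misc", "")
  | (kw, cat) :: rest =>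
    if PySem.Str.isIn kw lower then (cat, kw) else firstHit lower rest

def match_category_alt (text : String) : String × String :=
  firstHit (PySem.Str.lower text) pairsB

-- ===== PRECONDITION & SPEC =====
def Spec_match_category (text : String) (out : String × String) : Prop := out = match_category_alt text
instance (text : String) (out : String × String) : Decidable (Spec_match_category text out) := by unfold Spec_match_category; infer_instance

-- ===== CLAIM (what is proved, stated in full; the proofs are below) =====
def Claim_equal_match_category : Prop := ∀ (text : String), Dom_match_category text → Spec_match_category text (match_category text)

-- ===== LEMMAS AND PROOFS =====

-- A's update step, on a flattened (keyword, category) pair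
def stepA (p : String → Bool) (acc : String × String) (x : String × String) : String × String :=
  if p x.1 = true ∧ PySem.Str.len acc.2 < PySem.Str.len x.1 then (x.2, x.1) else acc

-- A's keyword pairs flattened in iteration order (proof artefact)
def flatPairs : List (String × String) :=
  categoryKeywords.flatMap fun ck => ck.2.map fun kw => (kw, ck.1)

-- the first keyword of maximal matching length (A's winner), computed structurally
def bestP (p : String → Bool) : List (String × String) → Option (String × String)
  | [] => none
  | x :: xs =>
    match bestP p xs with
    | none => if p x.1 then some x else none
    | some y => if p x.1 = true ∧ PySem.Str.len y.1 ≤ PySem.Str.len x.1 then some x else some y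

lemma foldl_flat (p : String → Bool) (D : List (String × List String)) (acc : String × String) :
    D.foldl
      (fun acc ck =>
        ck.2.foldl
          (fun (acc : String × String) kw =>
            if p kw = true ∧ PySem.Str.len acc.2 < PySem.Str.len kw then (ck.1, kw) else acc)
          acc)
      acc
    = (D.flatMap fun ck => ck.2.map fun kw => (kw, ck.1)).foldl (stepA p) acc := by
  induction D generalizing acc with
  | nil => rfl
  | cons ck D ih =>
    simp only [List.foldl_cons, List.flatMap_cons, List.foldl_append, List.foldl_map, ih, stepA]

lemma bestP_mem (p : String → Bool) (L : List (String × String)) (y : String × String)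
    (h : bestP p L = some y) : y ∈ L := by
  induction L with
  | nil => simp [bestP] at h
  | cons x xs ih =>
    simp only [bestP] at h
    cases hb : bestP p xs with
    | none =>
      simp only [hb] at h
      split_ifs at h
      injection h with h
      subst h
      exact List.mem_cons_self ..
    | some z =>
      simp only [hb] at h
      split_ifs at h
      · injection h with h
        subst h
        exact List.mem_cons_self ..
      · injection h with h
        subst h
        exact List.mem_cons_of_mem _ (ih hb)

lemma foldl_stepA_eq (p : String → Bool) (L : List (String × String)) (acc : String × String) :
    L.foldl (stepA p) acc =
      match bestP p L with
      | some y => if PySem.Str.len acc.2 < PySem.Str.len y.1 then (y.2, y.1) else acc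
      | none => acc := by
  induction L generalizing acc with
  | nil => rfl
  | cons x xs ih =>
    simp only [List.foldl_cons, bestP]
    rw [ih]
    cases hb : bestP p xs with
    | none =>
      simp only [stepA]
      by_cases hp : p x.1 = true
      · simp [hp]
      · simp [hp]
    | some y =>
      simp only [stepA]
      by_cases hp : p x.1 = true <;>
        simp only [hp, true_and] <;>
        split_ifs <;>
        simp_all <;>
        omega

-- B's early-return loop computes the first satisfying pair
lemma firstHit_eq_find? (lower : String) (L : List (String × String)) :
    firstHit lower L =
      match L.find? (fun z => PySem.Str.isIn z.1 lower) with
      | some q => (q.2, q.1)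
      | none => ("Misc", "") := by
  induction L with
  | nil => rfl
  | cons x xs ih =>
    obtain ⟨kw, cat⟩ := x
    simp only [PySem.Str.isIn] at ih
    simp only [firstHit, List.find?_cons, PySem.Str.isIn]
    by_cases hp : PySem.Chars.isIn kw.toList lower.toList = true
    · rw [if_pos hp, hp]
    · rw [if_neg hp]
      rw [Bool.not_eq_true] at hp
      rw [hp]
      exact ih

-- reference stable insertion sort by descending keyword length (proof artefact)
def insDesc (x : String × String) : List (String × String) → List (String × String)
  | [] => [x]
  | y :: ys => if PySem.Str.len x.1 < PySem.Str.len y.1 then y :: insDesc x ys else x :: y :: ys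

def sortDesc : List (String × String) → List (String × String)
  | [] => []
  | x :: xs => insDesc x (sortDesc xs)

lemma mem_insDesc (z x : String × String) (S : List (String × String)) :
    z ∈ insDesc x S ↔ z = x ∨ z ∈ S := by
  induction S with
  | nil => simp [insDesc]
  | cons y ys ih =>
    simp only [insDesc]
    split_ifs with hl
    · simp only [List.mem_cons, ih]; tauto
    · simp only [List.mem_cons]

lemma insDesc_pairwise (x : String × String) (S : List (String × String))
    (hS : S.Pairwise (fun a b => PySem.Str.len b.1 ≤ PySem.Str.len a.1)) :
    (insDesc x S).Pairwise (fun a b => PySem.Str.len b.1 ≤ PySem.Str.len a.1) := by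
  induction S with
  | nil => simp [insDesc]
  | cons y ys ih =>
    rcases List.pairwise_cons.mp hS with ⟨hy, hys⟩
    simp only [insDesc]
    split_ifs with hl
    · refine List.pairwise_cons.mpr ⟨?_, ih hys⟩
      intro z hz
      rcases (mem_insDesc z x ys).mp hz with h | h
      · subst h; omega
      · exact hy z h
    · refine List.pairwise_cons.mpr ⟨?_, hS⟩
      intro z hz
      rcases List.mem_cons.mp hz with h | h
      · subst h; omega
      · have := hy z h; omega

lemma sortDesc_pairwise (L : List (String × String)) :
    (sortDesc L).Pairwise (fun a b => PySem.Str.len b.1 ≤ PySem.Str.len a.1) := by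
  induction L with
  | nil => simp [sortDesc]
  | cons x xs ih => exact insDesc_pairwise x _ ih

lemma find?_insDesc (q : String × String → Bool) (x : String × String) (S : List (String × String))
    (hS : S.Pairwise (fun a b => PySem.Str.len b.1 ≤ PySem.Str.len a.1)) :
    (insDesc x S).find? q =
      match S.find? q with
      | some y => if PySem.Str.len x.1 < PySem.Str.len y.1 then some y
                  else if q x then some x else some y
      | none => if q x then some x else none := by
  induction S with
  | nil => simp [insDesc, List.find?]
  | cons y ys ih =>
    rcases List.pairwise_cons.mp hS with ⟨hy, hys⟩
    simp only [insDesc]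
    by_cases hl : PySem.Str.len x.1 < PySem.Str.len y.1
    · rw [if_pos hl, List.find?_cons]
      cases hq : q y with
      | true =>
        simp only [hq, List.find?]
        simp only [PySem.Str.len_eq] at hl ⊢
        rw [if_pos hl]
      | false => simp only [List.find?_cons, hq]; exact ih hys
    · rw [if_neg hl]
      cases hz : List.find? q (y :: ys) with
      | none => cases hq : q x <;> simp [hq, hz]
      | some z =>
        have hzle : PySem.Str.len z.1 ≤ PySem.Str.len y.1 := by
          rcases List.mem_cons.mp (List.mem_of_find?_eq_some hz) with h | h
          · subst h; omega
          · exact hy z h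
        have hnlt : ¬ PySem.Str.len x.1 < PySem.Str.len z.1 := by omega
        simp only [hz]
        rw [if_neg hnlt]
        cases hq : q x <;> simp [hq, hz]

lemma find?_sortDesc (p : String → Bool) (L : List (String × String)) :
    (sortDesc L).find? (fun z => p z.1) = bestP p L := by
  induction L with
  | nil => rfl
  | cons x xs ih =>
    show (insDesc x (sortDesc xs)).find? (fun z => p z.1) = _
    rw [find?_insDesc _ _ _ (sortDesc_pairwise xs), ih]
    cases hb : bestP p xs with
    | none => simp [bestP, hb]
    | some y =>
      simp only [bestP, hb]
      by_cases hp : p x.1 = true <;>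
        simp only [hp, true_and] <;>
        split_ifs <;>
        simp_all <;>
        omega

-- the parsed table is exactly the stable descending-length sort of A's flattened pairs
set_option maxRecDepth 100000 in
lemma pairsB_eq : pairsB = sortDesc flatPairs := by decide

set_option maxRecDepth 100000 in
lemma flatPairs_len_pos : ∀ x ∈ flatPairs, 0 < PySem.Str.len x.1 := by decide

-- ===== VERDICT (by name: the statement is the Claim_ definition above) =====
theorem match_category_spec : Claim_equal_match_category := by
  intro text _
  show match_category text = match_category_alt text
  set p : String → Bool := fun kw => PySem.Str.isIn kw (PySem.Str.lower text) with hp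
  have hA : match_category text = flatPairs.foldl (stepA p) ("Misc", "") :=
    foldl_flat p categoryKeywords ("Misc", "")
  have hB : match_category_alt text =
      (match pairsB.find? (fun z => p z.1) with
       | some q => (q.2, q.1)
       | none => ("Misc", "")) := firstHit_eq_find? (PySem.Str.lower text) pairsB
  rw [hA, hB, pairsB_eq, find?_sortDesc, foldl_stepA_eq]
  cases hb : bestP p flatPairs with
  | none => rfl
  | some y =>
    have hpos : 0 < PySem.Str.len y.1 := flatPairs_len_pos y (bestP_mem p flatPairs y hb)
    show (if PySem.Str.len (("Misc", "") : String × String).2 < PySem.Str.len y.1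
          then (y.2, y.1) else (("Misc", "") : String × String)) = (y.2, y.1)
    have h0 : PySem.Str.len (("Misc", ("" : String)) : String × String).2 = 0 := by decide
    rw [if_pos (by omega)]
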